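-- pv_equiv track=rewrite | github.com/design77b/blank-app | streamlit_app.py | _avoid_patterns
-- ===== SOURCE A (Python) =====
-- def _avoid_patterns(nums):
--     nums = sorted(nums)
--     # avoid 3+ consecutive numbers
--     consec = 0
--     for i in range(1, len(nums)):
--         if nums[i] == nums[i-1] + 1:
--             consec += 1
--     if consec >= 2:
--         return False
--     # avoid too many from 1..12 (date-like)
--     if sum(1 for x in nums if x <= 12) >= 5:
--         return False
--     # avoid all even/odd
--     ev = sum(1 for x in nums if x % 2 == 0)
--     if ev == 0 or ev == 6:
--         return False
--     return True
-- ===== SOURCE B (Python) =====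
-- def _avoid_patterns(nums):
--     s = set(nums)
--     consec = sum(1 for x in s if x + 1 in s)
--     date_like = sum(1 for x in nums if x <= 12)
--     ev = sum(1 for x in nums if x % 2 == 0)
--     return consec < 2 and date_like < 5 and ev != 0 and ev != 6
-- ===== Notes on version B (the rewrite author's own statement) =====
-- stated objective: simpler
-- what changed: B drops the sort entirely: it detects consecutive runs by set membership (count of distinct x with x+1 also present, which equals A's sorted-adjacency count), and replaces A's early-return chain by one conjunction.
import Mathlib
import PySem

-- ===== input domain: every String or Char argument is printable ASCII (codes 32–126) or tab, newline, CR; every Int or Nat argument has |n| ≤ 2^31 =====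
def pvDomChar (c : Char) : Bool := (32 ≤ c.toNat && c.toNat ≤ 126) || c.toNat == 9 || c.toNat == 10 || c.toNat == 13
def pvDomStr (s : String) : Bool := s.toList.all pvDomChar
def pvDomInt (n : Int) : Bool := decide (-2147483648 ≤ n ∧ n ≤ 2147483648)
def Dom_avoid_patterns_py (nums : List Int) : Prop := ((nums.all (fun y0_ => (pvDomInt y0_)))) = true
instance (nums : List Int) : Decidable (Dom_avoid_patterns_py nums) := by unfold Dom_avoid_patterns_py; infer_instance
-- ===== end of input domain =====

-- B avoids A's sort: it counts consecutive runs by set membership instead of sorted adjacency, and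
-- returns one conjunction instead of an early-return chain (objective: simpler).

-- ===== PORT A =====
def avoid_patterns_py (nums : List Int) : Bool :=
  let nums2 := PySem.List.sorted nums (fun x => x) false
  let consec : Int :=
    (PySem.List.pyRange 1 (nums2.length : Int) 1).foldl
      (fun acc i =>
        if PySem.List.pyGetD nums2 i 0 = PySem.List.pyGetD nums2 (i - 1) 0 + 1 then acc + 1 else acc)
      0
  if consec ≥ 2 then false
  else if ((nums2.filter (fun x => decide (x ≤ 12))).map (fun _ => (1 : Int))).sum ≥ 5 then false
  else
    let ev := ((nums2.filter (fun x => decide (PySem.Int.mod x 2 = 0))).map (fun _ => (1 : Int))).sum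
    if ev = 0 ∨ ev = 6 then false else true

-- ===== PORT B =====
def avoid_patterns_py_alt (nums : List Int) : Bool :=
  let s := PySem.Set.ofList nums
  let consec := ((s.filter (fun x => decide (x + 1 ∈ s))).map (fun _ => (1 : Int))).sum
  let dateLike := ((nums.filter (fun x => decide (x ≤ 12))).map (fun _ => (1 : Int))).sum
  let ev := ((nums.filter (fun x => decide (PySem.Int.mod x 2 = 0))).map (fun _ => (1 : Int))).sum
  decide (consec < 2) && decide (dateLike < 5) && decide (ev ≠ 0) && decide (ev ≠ 6)

-- ===== PRECONDITION & SPEC =====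
def Spec_avoid_patterns_py (nums : List Int) (out : Bool) : Prop := out = avoid_patterns_py_alt nums
instance (nums : List Int) (out : Bool) : Decidable (Spec_avoid_patterns_py nums out) := by unfold Spec_avoid_patterns_py; infer_instance

-- ===== CLAIM (what is proved, stated in full; the proofs are below) =====
def Claim_equal_avoid_patterns_py : Prop := ∀ (nums : List Int), Dom_avoid_patterns_py nums → Spec_avoid_patterns_py nums (avoid_patterns_py nums)

-- ===== LEMMAS AND PROOFS =====

-- count of adjacent pairs (a, a+1) in a list, scanned left to right (A's loop on the sorted list)
def adjCount : List Int → Nat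
  | x :: y :: t => (if y = x + 1 then 1 else 0) + adjCount (y :: t)
  | _ => 0

-- a "sum of 1 over a filter" is a countP
lemma sum_one_filter (l : List Int) (p : Int → Bool) :
    ((l.filter p).map (fun _ => (1 : Int))).sum = ((l.countP p : Nat) : Int) := by
  rw [PySem.List.sum_map_const_int]
  simp [List.countP_eq_length_filter]

-- A's index loop, written over Nat indices, is adjCount
lemma adjIdx (l : List Int) :
    List.countP (fun k => decide (l.getD (k + 1) 0 = l.getD k 0 + 1)) (List.range (l.length - 1))
      = adjCount l := by
  induction l with
  | nil => simp [adjCount]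
  | cons x t ih =>
    cases t with
    | nil => simp [adjCount]
    | cons y t =>
      have hlen : (x :: y :: t).length - 1 = t.length + 1 := by simp
      rw [hlen, List.range_succ_eq_map, List.countP_cons, List.countP_map]
      have h0 : (fun k => decide ((x :: y :: t).getD (k + 1) 0 = (x :: y :: t).getD k 0 + 1)) ∘ Nat.succ
          = fun k => decide ((y :: t).getD (k + 1) 0 = (y :: t).getD k 0 + 1) := by
        funext k
        simp [Function.comp, List.getD]
      rw [h0]
      have hlen2 : t.length = (y :: t).length - 1 := by simp
      rw [hlen2, ih]
      simp [adjCount, List.getD]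
      by_cases h : y = x + 1 <;> simp [h]
      all_goals omega

-- A's Python-index loop equals adjCount
lemma consecA (l : List Int) :
    (PySem.List.pyRange 1 (l.length : Int) 1).foldl
      (fun acc i =>
        if PySem.List.pyGetD l i 0 = PySem.List.pyGetD l (i - 1) 0 + 1 then acc + 1 else acc)
      0 = (adjCount l : Int) := by
  rw [PySem.List.foldl_ite_add_one]
  rw [PySem.List.pyRange_one, List.countP_map]
  have htn : ((l.length : Int) - 1).toNat = l.length - 1 := by omega
  have hc : ((fun i => decide (PySem.List.pyGetD l i 0 = PySem.List.pyGetD l (i - 1) 0 + 1)) ∘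
        fun k : Nat => (1 : Int) + (k : Int))
      = fun k : Nat => decide (l.getD (k + 1) 0 = l.getD k 0 + 1) := by
    funext k
    have h1 : (1 : Int) + (k : Int) = ((k + 1 : Nat) : Int) := by push_cast; ring
    have h2 : ((k + 1 : Nat) : Int) - 1 = ((k : Nat) : Int) := by push_cast; ring
    simp only [Function.comp, h1, h2, PySem.List.pyGetD_natCast]
  rw [hc, htn, adjIdx]
  omega

-- on a (≤)-sorted list, adjCount is the number of distinct values x with x+1 present
lemma adj_pairwise (l : List Int) (hp : l.Pairwise (· ≤ ·)) :
    (adjCount l : Int) = ((l.toFinset.filter (fun x => x + 1 ∈ l)).card : Int) := by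
  induction l with
  | nil => simp [adjCount]
  | cons x t ih =>
    cases t with
    | nil =>
      simp only [adjCount, List.toFinset_cons, List.toFinset_nil, insert_empty_eq]
      rw [Finset.filter_singleton]
      have : ¬ (x + 1 ∈ [x]) := by simp
      simp [this]
    | cons y t =>
      have hxle : x ≤ y := (List.pairwise_cons.mp hp).1 y (by simp)
      have hpt : (y :: t).Pairwise (· ≤ ·) := (List.pairwise_cons.mp hp).2
      have hyt : ∀ z ∈ t, y ≤ z := fun z hz => (List.pairwise_cons.mp hpt).1 z hz
      by_cases hxy : x = y
      · subst hxy
        have hmem : ∀ z, (z ∈ x :: x :: t) ↔ (z ∈ x :: t) := by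
          intro z; simp [List.mem_cons]
        have hfin : (x :: x :: t).toFinset = (x :: t).toFinset := by simp
        have hfil : ((x :: x :: t).toFinset.filter (fun z => z + 1 ∈ x :: x :: t))
            = ((x :: t).toFinset.filter (fun z => z + 1 ∈ x :: t)) := by
          rw [hfin]
          apply Finset.filter_congr
          intro z _
          simp [hmem]
        rw [hfil, ← ih hpt]
        have : ¬ (x = x + 1) := by omega
        simp [adjCount, this]
      · have hxlt : x < y := lt_of_le_of_ne hxle hxy
        have hxnot : x ∉ y :: t := by
          intro hx
          rcases List.mem_cons.mp hx with h | h
          · exact hxy h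
          · exact absurd (hyt x h) (by omega)
        have hfin : (x :: y :: t).toFinset = insert x (y :: t).toFinset := by simp
        have hpx : (x + 1 ∈ x :: y :: t) ↔ (y = x + 1) := by
          constructor
          · intro hm
            rcases List.mem_cons.mp hm with h | h
            · omega
            · rcases List.mem_cons.mp h with h | h
              · omega
              · have := hyt _ h; omega
          · intro h; simp [List.mem_cons]; omega
        have hcongr : ((y :: t).toFinset.filter (fun z => z + 1 ∈ x :: y :: t))
            = ((y :: t).toFinset.filter (fun z => z + 1 ∈ y :: t)) := by
          apply Finset.filter_congr
          intro z hz
          have hzy : y ≤ z := by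
            rcases List.mem_cons.mp (List.mem_toFinset.mp hz) with h | h
            · omega
            · exact hyt z h
          simp only [List.mem_cons]
          constructor
          · rintro (h | h)
            · omega
            · exact h
          · intro h; right; exact h
        have hsplit : ((x :: y :: t).toFinset.filter (fun z => z + 1 ∈ x :: y :: t)).card
            = (if y = x + 1 then 1 else 0) + ((y :: t).toFinset.filter (fun z => z + 1 ∈ y :: t)).card := by
          rw [hfin, Finset.filter_insert]
          by_cases hb : y = x + 1
          · rw [if_pos (hpx.mpr hb), if_pos hb]
            rw [Finset.card_insert_of_notMem (fun hx => hxnot (List.mem_toFinset.mp (Finset.mem_of_mem_filter _ hx)))]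
            rw [hcongr]; omega
          · rw [if_neg (fun h => hb (hpx.mp h)), if_neg hb, hcongr]
            omega
        have hihc := ih hpt
        simp only [adjCount]
        rw [hsplit]
        split_ifs <;> omega

-- B's set-membership count is the same Finset cardinality, over the original list
lemma countB (nums : List Int) :
    ((List.countP (fun x => decide (x + 1 ∈ PySem.Set.ofList nums)) (PySem.Set.ofList nums) : Nat) : Int)
      = ((nums.toFinset.filter (fun x => x + 1 ∈ nums)).card : Int) := by
  have hnd : (PySem.Set.ofList nums).Nodup := PySem.Set.nodup_ofList nums
  have hmem : ∀ z, z ∈ PySem.Set.ofList nums ↔ z ∈ nums := PySem.Set.mem_ofList nums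
  have h1 : List.countP (fun x => decide (x + 1 ∈ PySem.Set.ofList nums)) (PySem.Set.ofList nums)
      = ((PySem.Set.ofList nums).filter (fun x => decide (x + 1 ∈ PySem.Set.ofList nums))).length :=
    List.countP_eq_length_filter
  have h2 : ((PySem.Set.ofList nums).filter (fun x => decide (x + 1 ∈ PySem.Set.ofList nums))).length
      = ((PySem.Set.ofList nums).filter (fun x => decide (x + 1 ∈ PySem.Set.ofList nums))).toFinset.card :=
    (List.toFinset_card_of_nodup (hnd.filter _)).symm
  have h3 : ((PySem.Set.ofList nums).filter (fun x => decide (x + 1 ∈ PySem.Set.ofList nums))).toFinset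
      = (PySem.Set.ofList nums).toFinset.filter (fun x => x + 1 ∈ PySem.Set.ofList nums) := by
    rw [List.toFinset_filter]
    apply Finset.filter_congr
    intro z _; simp
  have h4 : (PySem.Set.ofList nums).toFinset = nums.toFinset := by
    apply Finset.ext
    intro z
    simp [List.mem_toFinset, hmem]
  have h5 : (PySem.Set.ofList nums).toFinset.filter (fun x => x + 1 ∈ PySem.Set.ofList nums)
      = nums.toFinset.filter (fun x => x + 1 ∈ nums) := by
    rw [h4]
    apply Finset.filter_congr
    intro z _
    simp [hmem]
  rw [h1, h2, h3, h5]

-- ===== VERDICT (by name: the statement is the Claim_ definition above) =====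
theorem avoid_patterns_py_spec : Claim_equal_avoid_patterns_py := by
  intro nums _
  unfold Spec_avoid_patterns_py avoid_patterns_py avoid_patterns_py_alt
  simp only []
  set s := PySem.List.sorted nums (fun x => x) false with hs
  have hperm : s.Perm nums := PySem.List.sorted_perm nums (fun x => x) false
  have hpw : s.Pairwise (· ≤ ·) := by
    have h := PySem.List.sorted_pairwise nums (fun x => x)
    simpa using h
  -- consec counts agree
  have hconsec :
      (PySem.List.pyRange 1 (s.length : Int) 1).foldl
        (fun acc i =>
          if PySem.List.pyGetD s i 0 = PySem.List.pyGetD s (i - 1) 0 + 1 then acc + 1 else acc)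
        0
      = (((PySem.Set.ofList nums).filter (fun x => decide (x + 1 ∈ PySem.Set.ofList nums))).map
          (fun _ => (1 : Int))).sum := by
    rw [consecA, sum_one_filter, adj_pairwise s hpw, countB]
    have hff : (s.toFinset.filter (fun x => x + 1 ∈ s))
        = (nums.toFinset.filter (fun x => x + 1 ∈ nums)) := by
      rw [List.toFinset_eq_of_perm s nums hperm]
      apply Finset.filter_congr
      intro z _
      simp [hperm.mem_iff]
    rw [hff]
  -- the two 0/1-sums agree (A sums over the sorted list, B over the original)
  have hdate :
      ((s.filter (fun x => decide (x ≤ 12))).map (fun _ => (1 : Int))).sum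
        = ((nums.filter (fun x => decide (x ≤ 12))).map (fun _ => (1 : Int))).sum := by
    rw [sum_one_filter, sum_one_filter, hperm.countP_eq]
  have hev :
      ((s.filter (fun x => decide (PySem.Int.mod x 2 = 0))).map (fun _ => (1 : Int))).sum
        = ((nums.filter (fun x => decide (PySem.Int.mod x 2 = 0))).map (fun _ => (1 : Int))).sum := by
    rw [sum_one_filter, sum_one_filter, hperm.countP_eq]
  rw [hconsec, hdate, hev]
  set c := (((PySem.Set.ofList nums).filter (fun x => decide (x + 1 ∈ PySem.Set.ofList nums))).map
      (fun _ => (1 : Int))).sum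
  set d := ((nums.filter (fun x => decide (x ≤ 12))).map (fun _ => (1 : Int))).sum
  set e := ((nums.filter (fun x => decide (PySem.Int.mod x 2 = 0))).map (fun _ => (1 : Int))).sum
  split_ifs <;> simp_all <;> omega
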